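-- pv_equiv track=rewrite | github.com/hitanshramtani/abrar-ncert-parser | python/parser/llm_parser.py | _sanitize_latex_escapes
-- ===== SOURCE A (Python) =====
-- def _is_hex_digit(value: str) -> bool:
--     """
--     Return True if char is a hexadecimal digit.
--     """
--     return value.lower() in '0123456789abcdef'
--
-- def _has_valid_unicode_escape(text: str, slash_index: int) -> bool:
--     """
--     Check whether a backslash-u escape at index is valid JSON unicode escape.
--     """
--     if slash_index + 5 >= len(text):
--         return False
--     if text[slash_index + 1] != 'u':
--         return False
--     code = text[slash_index + 2:slash_index + 6]
--     return len(code) == 4 and all(_is_hex_digit(ch) for ch in code)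
--
-- def _sanitize_latex_escapes(raw_text: str) -> str:
--     """
--     Repair invalid backslashes inside JSON string literals.
--
--     This is conservative and state-aware:
--     - preserves already valid escaped sequences
--     - doubles invalid single backslashes (common from LaTeX like \frac, \epsilon)
--     - avoids corrupting sequences such as `\\,` and `\\text`
--     """
--     result: list[str] = []
--     in_string = False
--     escaped = False
--     i = 0
--     length = len(raw_text)
--
--     while i < length:
--         char = raw_text[i]
--
--         if not in_string:
--             result.append(char)
--             if char == '"':
--                 in_string = True
--                 escaped = False
--             i += 1
--             continue
--
--         if escaped:
--             result.append(char)
--             escaped = False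
--             i += 1
--             continue
--
--         if char == '"':
--             result.append(char)
--             in_string = False
--             i += 1
--             continue
--
--         if char != '\\':
--             result.append(char)
--             i += 1
--             continue
--
--         next_char = raw_text[i + 1] if (i + 1) < length else ''
--         if next_char in {'"', '\\', '/'}:
--             # Keep valid JSON escapes that are common in model output.
--             result.append(char)
--             escaped = True
--             i += 1
--             continue
--
--         if next_char == 'u' and _has_valid_unicode_escape(raw_text, i):
--             result.append(char)
--             escaped = True
--             i += 1
--             continue
--
--         # Invalid escape inside JSON string, likely LaTeX command.
--         result.append('\\\\')
--         i += 1
--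
--     return ''.join(result)
-- ===== SOURCE B (Python) =====
-- def _valid_json_escape(text: str, i: int) -> bool:
--     """Backslash at index i begins a valid JSON escape (\\", \\\\, \\/ or \\uXXXX)."""
--     nxt = text[i + 1] if i + 1 < len(text) else None
--     if nxt in ('"', '\\', '/'):
--         return True
--     if nxt == 'u' and i + 5 < len(text):
--         return all(c.lower() in '0123456789abcdef' for c in text[i + 2:i + 6])
--     return False
--
--
-- def _next_state(state, text: str, i: int):
--     """Lexer-state transition: state is (in_string, escaped) before index i."""
--     in_string, escaped = state
--     ch = text[i]
--     if not in_string: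
--         return (ch == '"', False)
--     if escaped:
--         return (True, False)
--     if ch == '"':
--         return (False, False)
--     if ch == '\\' and _valid_json_escape(text, i):
--         return (True, True)
--     return (True, False)
--
--
-- def _sanitize_latex_escapes(raw_text: str) -> str:
--     """
--     Repair invalid backslashes inside JSON string literals.
--
--     Staged passes: pass 1 precomputes the lexer state (in_string, escaped)
--     before every character; pass 2 rewrites each character pointwise —
--     a character changes only when it is an unescaped backslash inside a
--     string that does not begin a valid JSON escape (it gets doubled).
--     """
--     states = []
--     st = (False, False)
--     for i in range(len(raw_text)):
--         states.append(st)
--         st = _next_state(st, raw_text, i)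
--     return ''.join(
--         '\\\\'
--         if st == (True, False) and raw_text[i] == '\\'
--            and not _valid_json_escape(raw_text, i)
--         else raw_text[i]
--         for i, st in enumerate(states)
--     )
-- ===== Notes on version B (the rewrite author's own statement) =====
-- stated objective: alternative
-- what changed: Replaced A's single stateful rewrite loop by two staged passes: pass 1 precomputes the lexer state (in_string, escaped) before every character, pass 2 is a pointwise map that doubles exactly the characters that are unescaped invalid backslashes inside a string.
import Mathlib
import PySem

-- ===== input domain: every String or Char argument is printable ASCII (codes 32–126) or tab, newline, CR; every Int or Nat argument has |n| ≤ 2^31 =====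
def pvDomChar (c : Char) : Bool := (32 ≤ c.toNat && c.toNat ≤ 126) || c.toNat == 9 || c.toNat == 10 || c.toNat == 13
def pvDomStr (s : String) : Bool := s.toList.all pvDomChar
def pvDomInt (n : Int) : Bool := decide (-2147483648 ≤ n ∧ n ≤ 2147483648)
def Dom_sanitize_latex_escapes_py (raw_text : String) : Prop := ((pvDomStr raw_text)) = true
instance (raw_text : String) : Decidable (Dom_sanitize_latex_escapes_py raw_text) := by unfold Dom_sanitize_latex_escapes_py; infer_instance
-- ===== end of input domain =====

-- B replaces A's single stateful rewrite loop by two staged passes: first a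
-- state-precomputation pass, then a pointwise rewrite pass (objective:
-- alternative decomposition, same O(n) cost).


-- ===== PORT A =====
-- _is_hex_digit: `value.lower() in '0123456789abcdef'` on a single char
-- (exact on the ASCII domain; ported as char membership of the lowered char).
-- Source B's per-char hex test is the same expression, so the helper is shared.
def pvIsHexDigit (c : Char) : Bool :=
  ("0123456789abcdef".toList).contains (PySem.Chars.lowerChar c)

-- _has_valid_unicode_escape(raw_text, i) read on the suffix rest = raw_text[i+1:]:
-- `slash_index + 5 >= len` is `rest.length < 5`, text[i+1] is rest[0],
-- code = text[i+2:i+6] are the next four chars (then len(code)==4 holds).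
def pvHasValidUnicodeAt (rest : List Char) : Bool :=
  match rest with
  | u :: h1 :: h2 :: h3 :: h4 :: _ =>
      u == 'u' && ([h1, h2, h3, h4].all pvIsHexDigit)
  | _ => false

-- A's while-loop: always advances by one char, state (in_string, escaped)
def pvLoopA : List Char → Bool → Bool → List Char
  | [], _, _ => []
  | c :: rest, inStr, esc =>
    if !inStr then
      c :: pvLoopA rest (c == '"') (if c == '"' then false else esc)
    else if esc then
      c :: pvLoopA rest inStr false
    else if c == '"' then
      c :: pvLoopA rest false esc
    else if c != '\\' then
      c :: pvLoopA rest inStr esc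
    else
      -- next_char = raw_text[i+1] if i+1 < length else ''  (none = '')
      match rest.head? with
      | some n =>
          if n == '"' || n == '\\' || n == '/' then
            c :: pvLoopA rest inStr true
          else if n == 'u' && pvHasValidUnicodeAt rest then
            c :: pvLoopA rest inStr true
          else
            '\\' :: '\\' :: pvLoopA rest inStr esc
      | none => '\\' :: '\\' :: pvLoopA rest inStr esc

def sanitize_latex_escapes_py (raw_text : String) : String :=
  String.ofList (pvLoopA raw_text.toList false false)

-- ===== PORT B =====
-- _valid_json_escape(text, i), read on the suffix after the backslash
-- (rest = text[i+1:]; `i + 5 < len(text)` is `rest.length ≥ 5`).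
def pvValidEscape (rest : List Char) : Bool :=
  match rest with
  | [] => false
  | n :: rest' =>
    if n == '"' || n == '\\' || n == '/' then true
    else if n == 'u' && decide (rest'.length ≥ 4) then
      (rest'.take 4).all pvIsHexDigit
    else false

-- _next_state: lexer-state transition, state = (in_string, escaped) before i
def pvNextState (st : Bool × Bool) (c : Char) (rest : List Char) : Bool × Bool :=
  if !st.1 then (c == '"', false)
  else if st.2 then (true, false)
  else if c == '"' then (false, false)
  else if c == '\\' && pvValidEscape rest then (true, true)
  else (true, false)

-- pass 1: the list of states before each position
def pvStates : List Char → (Bool × Bool) → List (Bool × Bool)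
  | [], _ => []
  | c :: rest, st => st :: pvStates rest (pvNextState st c rest)

-- pass 2: pointwise rewrite of each character, given its precomputed state
def pvRender : List (Bool × Bool) → List Char → List Char
  | st :: sts, c :: rest =>
      (if st == (true, false) && c == '\\' && !pvValidEscape rest
       then ['\\', '\\'] else [c]) ++ pvRender sts rest
  | _, _ => []

def sanitize_latex_escapes_py_alt (raw_text : String) : String :=
  String.ofList (pvRender (pvStates raw_text.toList (false, false)) raw_text.toList)

-- ===== PRECONDITION & SPEC =====
def Spec_sanitize_latex_escapes_py (raw_text : String) (out : String) : Prop := out = sanitize_latex_escapes_py_alt raw_text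
instance (raw_text : String) (out : String) : Decidable (Spec_sanitize_latex_escapes_py raw_text out) := by unfold Spec_sanitize_latex_escapes_py; infer_instance

-- ===== CLAIM (what is proved, stated in full; the proofs are below) =====
def Claim_equal_sanitize_latex_escapes_py : Prop := ∀ (raw_text : String), Dom_sanitize_latex_escapes_py raw_text → Spec_sanitize_latex_escapes_py raw_text (sanitize_latex_escapes_py raw_text)

-- ===== LEMMAS AND PROOFS =====
-- A's unicode test on the suffix after the backslash, with 'u' first, is
-- exactly B's length-and-take-4 test (the hex predicates are identical).
lemma pvValid_unicode_eq (rest' : List Char) :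
    pvHasValidUnicodeAt ('u' :: rest')
      = (decide (rest'.length ≥ 4) && (rest'.take 4).all pvIsHexDigit) := by
  match rest' with
  | h1 :: h2 :: h3 :: h4 :: tl => simp [pvHasValidUnicodeAt, List.take]
  | [] => simp [pvHasValidUnicodeAt]
  | [h1] => simp [pvHasValidUnicodeAt]
  | [h1, h2] => simp [pvHasValidUnicodeAt]
  | [h1, h2, h3] => simp [pvHasValidUnicodeAt]

lemma pvValidEscape_u (rest' : List Char) :
    pvValidEscape ('u' :: rest')
      = (decide (rest'.length ≥ 4) && (rest'.take 4).all pvIsHexDigit) := by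
  by_cases h : rest'.length ≥ 4 <;> simp [pvValidEscape, h]

-- the transition never produces the impossible state (escaped outside string)
lemma pvNext_inv (st : Bool × Bool) (c : Char) (rest : List Char)
    (h : (pvNextState st c rest).2 = true) : (pvNextState st c rest).1 = true := by
  unfold pvNextState at h ⊢
  split_ifs at h ⊢ <;> simp_all

-- one step of A's loop = one pointwise emission + the transitioned state
lemma pvStepA (c : Char) (rest : List Char) (inStr esc : Bool)
    (hinv : esc = true → inStr = true) :
    pvLoopA (c :: rest) inStr esc =
      (if ((inStr, esc) == (true, false)) && c == '\\' && !pvValidEscape rest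
       then ['\\', '\\'] else [c])
        ++ pvLoopA rest (pvNextState (inStr, esc) c rest).1
                        (pvNextState (inStr, esc) c rest).2 := by
  cases inStr with
  | false =>
    have hesc : esc = false := by
      cases esc with
      | false => rfl
      | true => exact absurd (hinv rfl) (by simp)
    subst hesc
    by_cases hq : c = '"' <;> simp [pvLoopA, pvNextState, hq]
  | true =>
    cases esc with
    | true => simp [pvLoopA, pvNextState]
    | false =>
      by_cases hq : c = '"'
      · subst hq; simp [pvLoopA, pvNextState]
      · by_cases hb : c = '\\'
        · subst hb
          match rest with
          | [] => simp [pvLoopA, pvNextState, pvValidEscape]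
          | n :: rest' =>
            by_cases hv : (n = '"' ∨ n = '\\' ∨ n = '/')
            · have hve : pvValidEscape (n :: rest') = true := by
                rcases hv with h1 | h1 | h1 <;> simp [pvValidEscape, h1]
              have hA : pvLoopA ('\\' :: n :: rest') true false
                  = '\\' :: pvLoopA (n :: rest') true true := by
                rcases hv with h1 | h1 | h1 <;> subst h1 <;> simp [pvLoopA]
              rw [hA]; simp [pvNextState, hve]
            · by_cases hn : n = 'u'
              · subst hn
                by_cases hu : (decide (rest'.length ≥ 4)
                    && (rest'.take 4).all pvIsHexDigit) = true
                · have hA : pvLoopA ('\\' :: 'u' :: rest') true false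
                      = '\\' :: pvLoopA ('u' :: rest') true true := by
                    simp [pvLoopA, pvValid_unicode_eq, hu]
                  rw [hA]; simp [pvNextState, pvValidEscape_u, hu]
                · have hA : pvLoopA ('\\' :: 'u' :: rest') true false
                      = '\\' :: '\\' :: pvLoopA ('u' :: rest') true false := by
                    simp [pvLoopA, pvValid_unicode_eq, hu]
                  rw [hA]; simp [pvNextState, pvValidEscape_u, hu]
              · push Not at hv
                obtain ⟨h1, h2, h3⟩ := hv
                have hve : pvValidEscape (n :: rest') = false := by
                  simp [pvValidEscape, h1, h2, h3, hn]
                have hA : pvLoopA ('\\' :: n :: rest') true false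
                    = '\\' :: '\\' :: pvLoopA (n :: rest') true false := by
                  simp [pvLoopA, pvHasValidUnicodeAt, h1, h2, h3, hn]
                rw [hA]; simp [pvNextState, hve]
        · simp [pvLoopA, pvNextState, hq, hb]

-- the core correspondence: A's one-pass loop equals B's render-over-states,
-- for every state satisfying the invariant `escaped → in_string`.
lemma pvLoop_eq_render : ∀ (xs : List Char) (inStr esc : Bool),
    (esc = true → inStr = true) →
    pvLoopA xs inStr esc = pvRender (pvStates xs (inStr, esc)) xs := by
  intro xs
  induction xs with
  | nil => intro inStr esc _; simp [pvLoopA, pvStates, pvRender]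
  | cons c rest ih =>
    intro inStr esc hinv
    rw [pvStepA c rest inStr esc hinv, pvStates, pvRender,
        ih _ _ (fun h => pvNext_inv _ c rest h)]

-- ===== VERDICT (by name: the statement is the Claim_ definition above) =====
theorem sanitize_latex_escapes_py_spec : Claim_equal_sanitize_latex_escapes_py := by
  intro raw_text _
  unfold Spec_sanitize_latex_escapes_py sanitize_latex_escapes_py sanitize_latex_escapes_py_alt
  rw [pvLoop_eq_render raw_text.toList false false (by simp)]
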